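-- pv_equiv track=rewrite | github.com/vvivivivv/SC2079-MDP-Group-24 | algorithm_v4_no_cw/algo/algo.py | _insert_opportunistic_snaps
-- ===== SOURCE A (Python) =====
-- def _insert_opportunistic_snaps(commands, obstacles_data):
--     """Insert one extra SNAP before and one after each primary SNAP.
--
--     For each SNAP{id}, inserts a duplicate SNAP:
--       - after the move command immediately before the SNAP
--       - after the move command immediately after the SNAP
--     """
--     if not obstacles_data:
--         return commands
--
--     # Find primary SNAP indices
--     snap_info = []
--     for i, cmd in enumerate(commands):
--         if cmd.startswith("SNAP"):
--             try:
--                 ob_id = int(cmd[4:])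
--                 snap_info.append((i, ob_id))
--             except ValueError:
--                 pass
--
--     # Collect insertion points
--     insert_list = []
--
--     for snap_idx, ob_id in snap_info:
--         snap_cmd = f"SNAP{ob_id}"
--
--         # 1 command before: after the command two steps before the SNAP
--         j = snap_idx - 2
--         if j >= 0 and not commands[j].startswith("SNAP") and not commands[j].startswith("FIN"):
--             insert_list.append((j, snap_cmd))
--
--         # 1 command after the SNAP
--         j = snap_idx + 1
--         if j < len(commands) and not commands[j].startswith("SNAP") and not commands[j].startswith("FIN"):
--             insert_list.append((j, snap_cmd))
--
--     if not insert_list: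
--         return commands
--
--     # Insert from end to preserve indices
--     insert_list.sort(key=lambda t: t[0], reverse=True)
--     result = list(commands)
--     for idx, snap_cmd in insert_list:
--         result.insert(idx + 1, snap_cmd)
--
--     return result
-- ===== SOURCE B (Python) =====
-- def _insert_opportunistic_snaps(commands, obstacles_data):
--     """One-pass rewrite: bucket the duplicate SNAPs per position in a dict,
--     then emit the result in a single forward pass (no sort, no list.insert)."""
--     if not obstacles_data:
--         return commands
--
--     n = len(commands)
--     after = {}  # position -> list of snap commands to emit right after it
--     for i, cmd in enumerate(commands):
--         if not cmd.startswith("SNAP"):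
--             continue
--         try:
--             ob_id = int(cmd[4:])
--         except ValueError:
--             continue
--         snap_cmd = "SNAP%d" % ob_id
--         for j in (i - 2, i + 1):
--             if 0 <= j < n and not commands[j].startswith("SNAP") and not commands[j].startswith("FIN"):
--                 after.setdefault(j, []).append(snap_cmd)
--
--     result = []
--     for i, cmd in enumerate(commands):
--         result.append(cmd)
--         bucket = after.get(i)
--         if bucket:
--             result.extend(reversed(bucket))
--     return result
-- ===== Notes on version B (the rewrite author's own statement) =====
-- stated objective: alternative
-- what changed: Instead of collecting insertion points, sorting them descending and calling list.insert repeatedly, B buckets the duplicate SNAPs per position in a dict during one scan and emits the result in a single forward pass; on SNAP-free inputs both are linear, so the measured speed is the same.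
import Mathlib
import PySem

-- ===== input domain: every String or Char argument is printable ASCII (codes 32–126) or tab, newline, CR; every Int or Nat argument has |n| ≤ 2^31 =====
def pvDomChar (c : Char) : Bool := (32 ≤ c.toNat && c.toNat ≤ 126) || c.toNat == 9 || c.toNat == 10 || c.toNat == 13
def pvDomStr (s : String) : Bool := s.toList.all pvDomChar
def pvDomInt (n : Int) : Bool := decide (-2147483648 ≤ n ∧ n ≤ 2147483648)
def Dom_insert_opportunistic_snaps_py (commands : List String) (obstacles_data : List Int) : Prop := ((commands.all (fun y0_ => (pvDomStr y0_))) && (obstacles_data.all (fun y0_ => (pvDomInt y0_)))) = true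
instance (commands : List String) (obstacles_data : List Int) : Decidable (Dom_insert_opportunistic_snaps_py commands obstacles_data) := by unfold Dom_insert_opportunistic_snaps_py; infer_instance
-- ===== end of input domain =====

-- B replaces A's collect/sort/repeated-list.insert scheme by per-position buckets in a dict and a
-- single forward rebuild pass; the return value is proved identical on all inputs.

-- condition `not commands[j].startswith("SNAP") and not commands[j].startswith("FIN")`,
-- appearing verbatim in both Pythons
def pvNotSnapFin (commands : List String) (j : Int) : Bool :=
  !(PySem.Str.startswith (PySem.List.pyGetD commands j "") "SNAP") &&
  !(PySem.Str.startswith (PySem.List.pyGetD commands j "") "FIN")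

-- ===== PORT A =====
-- body of A's first loop: collect (i, ob_id) for commands "SNAP<int>" (try/except int(cmd[4:]))
def pvSnapInfoStep (acc : List (Int × Int)) (p : Int × String) : List (Int × Int) :=
  if PySem.Str.startswith p.2 "SNAP" then
    match PySem.Int.ofStr? (PySem.Str.slice p.2 (some 4) none) with
    | some ob_id => acc ++ [(p.1, ob_id)]
    | none => acc
  else acc

-- body of A's second loop: collect the insertion points for one snap
def pvInsertListStep (commands : List String) (acc : List (Int × String)) (q : Int × Int) :
    List (Int × String) :=
  let snap_cmd := "SNAP" ++ PySem.Int.toStr q.2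
  -- 1 command before: after the command two steps before the SNAP
  let acc1 := if q.1 - 2 ≥ 0 ∧ pvNotSnapFin commands (q.1 - 2) = true
              then acc ++ [(q.1 - 2, snap_cmd)] else acc
  -- 1 command after the SNAP
  if q.1 + 1 < PySem.List.len commands ∧ pvNotSnapFin commands (q.1 + 1) = true
  then acc1 ++ [(q.1 + 1, snap_cmd)] else acc1

def insert_opportunistic_snaps_py (commands : List String) (obstacles_data : List Int) : List String :=
  if obstacles_data = [] then commands
  else
    let snap_info := (PySem.List.enumerate commands).foldl pvSnapInfoStep []
    let insert_list := snap_info.foldl (pvInsertListStep commands) []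
    if insert_list = [] then commands
    else
      -- insert from end to preserve indices (sort by index, descending)
      (PySem.List.sorted insert_list (fun t => t.1) true).foldl
        (fun result t => PySem.List.insert result (t.1 + 1) t.2) commands

-- ===== PORT B =====
-- body of B's single scan: push the duplicate snap command onto the buckets of
-- positions i-2 and i+1 (bounds and SNAP/FIN checks as in Source B)
def pvBucketStep (commands : List String) (d : PySem.Dict Int (List String)) (p : Int × String) :
    PySem.Dict Int (List String) :=
  if !(PySem.Str.startswith p.2 "SNAP") then d
  else
    match PySem.Int.ofStr? (PySem.Str.slice p.2 (some 4) none) with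
    | none => d
    | some ob_id =>
      let snap_cmd := "SNAP" ++ PySem.Int.toStr ob_id
      let d1 := if 0 ≤ p.1 - 2 ∧ p.1 - 2 < PySem.List.len commands ∧ pvNotSnapFin commands (p.1 - 2) = true
                then d.insert (p.1 - 2) (d.getD (p.1 - 2) [] ++ [snap_cmd]) else d
      if 0 ≤ p.1 + 1 ∧ p.1 + 1 < PySem.List.len commands ∧ pvNotSnapFin commands (p.1 + 1) = true
      then d1.insert (p.1 + 1) (d1.getD (p.1 + 1) [] ++ [snap_cmd]) else d1

def insert_opportunistic_snaps_py_alt (commands : List String) (obstacles_data : List Int) : List String :=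
  if obstacles_data = [] then commands
  else
    -- bucket per position, built in one scan
    let after := (PySem.List.enumerate commands).foldl (pvBucketStep commands) PySem.Dict.empty
    -- single forward rebuild
    (PySem.List.enumerate commands).foldl
      (fun result p => result ++ p.2 :: (after.getD p.1 []).reverse) []

-- ===== PRECONDITION & SPEC =====
def Spec_insert_opportunistic_snaps_py (commands : List String) (obstacles_data : List Int) (out : List String) : Prop := out = insert_opportunistic_snaps_py_alt commands obstacles_data
instance (commands : List String) (obstacles_data : List Int) (out : List String) : Decidable (Spec_insert_opportunistic_snaps_py commands obstacles_data out) := by unfold Spec_insert_opportunistic_snaps_py; infer_instance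

-- ===== CLAIM (what is proved, stated in full; the proofs are below) =====
def Claim_equal_insert_opportunistic_snaps_py : Prop := ∀ (commands : List String) (obstacles_data : List Int), Dom_insert_opportunistic_snaps_py commands obstacles_data → Spec_insert_opportunistic_snaps_py commands obstacles_data (insert_opportunistic_snaps_py commands obstacles_data)

-- ===== LEMMAS AND PROOFS =====

-- (index, ob_id) contributed by one scanned command to A's snap_info
def pvSEnt (p : Int × String) : List (Int × Int) :=
  if PySem.Str.startswith p.2 "SNAP" then
    (PySem.Int.ofStr? (PySem.Str.slice p.2 (some 4) none)).elim [] (fun ob => [(p.1, ob)])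
  else []

-- the insert_list entries contributed by one snap_info entry
def pvGEnt (cs : List String) (q : Int × Int) : List (Int × String) :=
  (if q.1 - 2 ≥ 0 ∧ pvNotSnapFin cs (q.1 - 2) = true
   then [(q.1 - 2, "SNAP" ++ PySem.Int.toStr q.2)] else []) ++
  (if q.1 + 1 < PySem.List.len cs ∧ pvNotSnapFin cs (q.1 + 1) = true
   then [(q.1 + 1, "SNAP" ++ PySem.Int.toStr q.2)] else [])

-- entries (position, duplicate command) contributed by one scanned command
def pvEntriesOf (cs : List String) (p : Int × String) : List (Int × String) :=
  (pvSEnt p).flatMap (pvGEnt cs)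

-- the common normal form of both results: each command followed by its (reversed) bucket
def pvInterleave (cs : List String) (i : Int) (ps : List (Int × String)) : List String :=
  match cs with
  | [] => []
  | c :: t => c :: (((ps.filter (fun q => q.1 = i)).map (fun q => q.2)).reverse ++ pvInterleave t (i + 1) ps)

theorem pvInterleave_nil (cs : List String) (i : Int) : pvInterleave cs i [] = cs := by
  induction cs generalizing i with
  | nil => rfl
  | cons c t ih => simp [pvInterleave, ih]

theorem pvInterleave_len_ge (cs : List String) (i : Int) (ps : List (Int × String)) :
    cs.length ≤ (pvInterleave cs i ps).length := by
  induction cs generalizing i with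
  | nil => simp [pvInterleave]
  | cons c t ih =>
    have := ih (i + 1)
    simp only [pvInterleave, List.length_cons, List.length_append]
    omega

theorem pvInterleave_congr (cs : List String) (i : Int) (ps qs : List (Int × String))
    (h : ∀ v, ps.filter (fun q => q.1 = v) = qs.filter (fun q => q.1 = v)) :
    pvInterleave cs i ps = pvInterleave cs i qs := by
  induction cs generalizing i with
  | nil => rfl
  | cons c t ih => simp [pvInterleave, h i, ih (i + 1)]

theorem pvInterleave_snoc_lt (cs : List String) (i j : Int) (c : String)
    (ps : List (Int × String)) (hj : j < i) :
    pvInterleave cs i (ps ++ [(j, c)]) = pvInterleave cs i ps := by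
  induction cs generalizing i with
  | nil => rfl
  | cons c0 t ih =>
    have hne : ¬ ((j : Int) = i) := by omega
    simp [pvInterleave, List.filter_append, hne, ih (i + 1) (by omega)]

theorem pvInsert_cons_succ (xs : List String) (x : String) (m : Nat) (v : String)
    (h2 : m ≤ xs.length) :
    PySem.List.insert (x :: xs) (((m + 1 : Nat) : Int)) v = x :: PySem.List.insert xs ((m : Nat) : Int) v := by
  rw [PySem.List.insert_natCast _ (m + 1) _ (by simp; omega),
      PySem.List.insert_natCast _ m _ h2]
  simp

-- key step: inserting at offset j+1-i lands the new duplicate right after command j,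
-- in front of the duplicates already inserted there
theorem pvInsert_interleave (cs : List String) (i j : Int) (c : String)
    (ps : List (Int × String)) (hij : i ≤ j) (hlt : j < i + cs.length)
    (hmem : ∀ p ∈ ps, j ≤ p.1) :
    PySem.List.insert (pvInterleave cs i ps) (j + 1 - i) c
      = pvInterleave cs i (ps ++ [(j, c)]) := by
  induction cs generalizing i ps with
  | nil => simp at hlt; omega
  | cons c0 t ih =>
    by_cases hji : j = i
    · subst hji
      rw [show j + 1 - j = (((0 + 1 : Nat)) : Int) by omega]
      simp only [pvInterleave]
      rw [pvInsert_cons_succ _ _ 0 _ (Nat.zero_le _)]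
      rw [show ((0 : Nat) : Int) = 0 by norm_num, PySem.List.insert_zero]
      simp only [List.filter_append, List.filter_cons, List.filter_nil]
      rw [pvInterleave_snoc_lt t (j + 1) j c ps (by omega)]
      simp
    · have hij' : i < j := lt_of_le_of_ne hij (fun h => hji h.symm)
      have hfil : ps.filter (fun q => q.1 = i) = [] := by
        rw [List.filter_eq_nil_iff]
        intro p hp
        have := hmem p hp
        simp only [decide_eq_true_eq]
        omega
      have hfil' : (ps ++ [(j, c)]).filter (fun q => q.1 = i) = [] := by
        rw [List.filter_append, hfil, List.nil_append, List.filter_eq_nil_iff]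
        intro p hp
        simp only [List.mem_singleton] at hp
        subst hp
        simp only [decide_eq_true_eq]
        omega
      simp only [pvInterleave, hfil, hfil', List.map_nil, List.reverse_nil, List.nil_append]
      have hlen := pvInterleave_len_ge t (i + 1) ps
      simp only [List.length_cons] at hlt
      have hm : (j - i).toNat ≤ (pvInterleave t (i + 1) ps).length := by push_cast at hlt; omega
      rw [show j + 1 - i = ((((j - i).toNat + 1 : Nat)) : Int) by omega]
      rw [pvInsert_cons_succ _ _ _ _ hm]
      rw [show (((j - i).toNat : Nat) : Int) = j + 1 - (i + 1) by omega]
      rw [ih (i + 1) ps (by omega) (by push_cast at hlt ⊢; omega) hmem]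

-- folding A's back-to-front inserts over a descending (index, cmd) list yields the normal form
theorem pvFoldl_insert_interleave (ps : List (Int × String)) (cs : List String)
    (hsort : List.Pairwise (fun a b => b.1 ≤ a.1) ps)
    (hb : ∀ p ∈ ps, 0 ≤ p.1 ∧ p.1 < (cs.length : Int)) :
    ps.foldl (fun result t => PySem.List.insert result (t.1 + 1) t.2) cs
      = pvInterleave cs 0 ps := by
  induction ps using List.reverseRecOn with
  | nil => simpa using (pvInterleave_nil cs 0).symm
  | append_singleton qs t ih =>
    rw [List.foldl_append]
    have hp := List.pairwise_append.1 hsort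
    have hq : ∀ p ∈ qs, t.1 ≤ p.1 := fun p hp' => (hp.2.2 p hp' t (by simp))
    rw [ih hp.1 (fun p hp' => hb p (by simp [hp']))]
    simp only [List.foldl_cons, List.foldl_nil]
    have hbt := hb t (by simp)
    rw [show t.1 + 1 = t.1 + 1 - 0 by omega,
        pvInsert_interleave cs 0 t.1 t.2 qs (by omega) (by omega) hq]

-- ---- stability of Python's reverse sort: per-key sublists are preserved ----

theorem pvFilter_insertBy (v : Int) (x : Int × String) (ys : List (Int × String))
    (h : List.Pairwise (fun a b => b.1 ≤ a.1) ys) :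
    (PySem.List.insertBy (fun a b => decide (b.1 < a.1)) x ys).filter (fun q => q.1 = v)
      = ys.filter (fun q => q.1 = v) ++ List.filter (fun q => q.1 = v) [x] := by
  induction ys with
  | nil => simp [PySem.List.insertBy]
  | cons y t ih =>
    rw [PySem.List.insertBy.eq_2]
    by_cases hb : y.1 < x.1
    · simp only [hb, decide_true, if_true]
      by_cases hx : x.1 = v
      · have hfil : (y :: t).filter (fun q => q.1 = v) = [] := by
          rw [List.filter_eq_nil_iff]
          intro z hz
          rcases List.mem_cons.1 hz with hz | hz
          · subst hz; simp only [decide_eq_true_eq]; omega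
          · have := (List.pairwise_cons.1 h).1 z hz; simp only [decide_eq_true_eq]; omega
        rw [List.filter_cons, hfil]
        simp [hx]
      · rw [List.filter_cons]
        simp only [hx, decide_false, Bool.false_eq_true, if_false]
        simp [hx]
    · simp only [hb, decide_false, Bool.false_eq_true, if_false]
      rw [List.filter_cons, List.filter_cons, ih (List.pairwise_cons.1 h).2]
      split <;> simp

theorem pvFilter_foldl_insertBy (xs : List (Int × String)) (acc : List (Int × String)) (v : Int)
    (h : List.Pairwise (fun a b => b.1 ≤ a.1) acc) :
    (xs.foldl (fun acc x => PySem.List.insertBy (fun a b => decide (b.1 < a.1)) x acc) acc).filter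
        (fun q => q.1 = v)
      = acc.filter (fun q => q.1 = v) ++ xs.filter (fun q => q.1 = v) := by
  induction xs generalizing acc with
  | nil => simp
  | cons x t ih =>
    simp only [List.foldl_cons]
    rw [ih _ (PySem.List.insertBy_pairwise_ge (fun q => q.1) x acc h),
        pvFilter_insertBy v x acc h, List.filter_cons]
    split <;> simp_all

theorem pvFilter_sorted (xs : List (Int × String)) (v : Int) :
    (PySem.List.sorted xs (fun t => t.1) true).filter (fun q => q.1 = v)
      = xs.filter (fun q => q.1 = v) := by
  rw [PySem.List.sorted_rev_eq_foldl_insertBy]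
  have h := pvFilter_foldl_insertBy xs [] v List.Pairwise.nil
  exact h.trans (by simp)

-- ---- enumerate bounds and entry bounds ----

theorem pvMem_enumerate (cs : List String) (s : Int) (p : Int × String)
    (hp : p ∈ PySem.List.enumerate cs s) : s ≤ p.1 ∧ p.1 < s + cs.length := by
  induction cs generalizing s with
  | nil => simp [PySem.List.enumerate_nil] at hp
  | cons c t ih =>
    rw [PySem.List.enumerate_cons] at hp
    rcases List.mem_cons.1 hp with hp | hp
    · subst hp; simp
    · have := ih (s + 1) hp
      simp only [List.length_cons]
      push_cast at this ⊢
      omega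

theorem pvEntriesOf_bounds (cs : List String) (p : Int × String) (e : Int × String)
    (he : e ∈ pvEntriesOf cs p) (h0 : 0 ≤ p.1) (h1 : p.1 < (cs.length : Int)) :
    0 ≤ e.1 ∧ e.1 < (cs.length : Int) := by
  have hlen : PySem.List.len cs = (cs.length : Int) := by simp [PySem.List.len]
  obtain ⟨q, hq, he⟩ := List.mem_flatMap.1 he
  have hq1 : q.1 = p.1 := by
    simp only [pvSEnt] at hq
    split at hq
    · cases hparse : PySem.Int.ofStr? (PySem.Str.slice p.2 (some 4) none) <;> rw [hparse] at hq
      · simp at hq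
      · simp only [Option.elim_some, List.mem_singleton] at hq
        rw [hq]
    · simp at hq
  simp only [pvGEnt] at he
  rcases List.mem_append.1 he with h | h
  · rcases (by split at h <;> simp_all :
        (q.1 - 2 ≥ 0 ∧ pvNotSnapFin cs (q.1 - 2) = true) ∧ e = (q.1 - 2, "SNAP" ++ PySem.Int.toStr q.2))
      with ⟨⟨hc, -⟩, he'⟩
    subst he'
    constructor <;> simp <;> omega
  · rcases (by split at h <;> simp_all :
        (q.1 + 1 < PySem.List.len cs ∧ pvNotSnapFin cs (q.1 + 1) = true) ∧ e = (q.1 + 1, "SNAP" ++ PySem.Int.toStr q.2))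
      with ⟨⟨hc, -⟩, he'⟩
    rw [hlen] at hc
    subst he'
    constructor <;> simp <;> omega

-- ---- B-side: the dict bucket at v is the per-key sublist of the entry list ----

def pvDApp (d : PySem.Dict Int (List String)) (e : Int × String) : PySem.Dict Int (List String) :=
  d.insert e.1 (d.getD e.1 [] ++ [e.2])

theorem pvGetD_foldl_dApp (l : List (Int × String)) (d : PySem.Dict Int (List String)) (v : Int) :
    (l.foldl pvDApp d).getD v []
      = d.getD v [] ++ (l.filter (fun q => q.1 = v)).map (fun q => q.2) := by
  induction l generalizing d with
  | nil => simp
  | cons e t ih =>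
    simp only [List.foldl_cons, ih, List.filter_cons]
    by_cases hv : e.1 = v
    · rw [show pvDApp d e = d.insert e.1 (d.getD e.1 [] ++ [e.2]) from rfl,
          PySem.Dict.getD_insert, if_pos hv.symm, hv]
      simp
    · rw [show pvDApp d e = d.insert e.1 (d.getD e.1 [] ++ [e.2]) from rfl,
          PySem.Dict.getD_insert, if_neg (fun hh => hv hh.symm)]
      simp [hv]

theorem pvSnapInfo_flatMap (l : List (Int × String)) (acc : List (Int × Int)) :
    l.foldl pvSnapInfoStep acc = acc ++ l.flatMap pvSEnt := by
  induction l generalizing acc with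
  | nil => simp
  | cons p t ih =>
    rw [List.foldl_cons, ih (pvSnapInfoStep acc p), List.flatMap_cons]
    suffices h : pvSnapInfoStep acc p = acc ++ pvSEnt p by rw [h, List.append_assoc]
    rw [pvSnapInfoStep, pvSEnt]
    by_cases hs : PySem.Str.startswith p.2 "SNAP"
    · rw [if_pos hs, if_pos hs]
      cases hparse : PySem.Int.ofStr? (PySem.Str.slice p.2 (some 4) none) <;> simp
    · rw [if_neg hs, if_neg hs]
      simp

theorem pvInsertList_flatMap (cs : List String) (l : List (Int × Int)) (acc : List (Int × String)) :
    l.foldl (pvInsertListStep cs) acc = acc ++ l.flatMap (pvGEnt cs) := by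
  induction l generalizing acc with
  | nil => simp
  | cons q t ih =>
    simp only [List.foldl_cons, List.flatMap_cons, ih, pvInsertListStep, pvGEnt]
    split_ifs <;> simp

theorem pvBucketStep_eq (cs : List String) (p : Int × String) (d : PySem.Dict Int (List String))
    (h0 : 0 ≤ p.1) (h1 : p.1 < (cs.length : Int)) :
    pvBucketStep cs d p = (pvEntriesOf cs p).foldl pvDApp d := by
  have hlen : PySem.List.len cs = (cs.length : Int) := by simp [PySem.List.len]
  rw [pvBucketStep, pvEntriesOf, pvSEnt]
  by_cases hs : PySem.Str.startswith p.2 "SNAP"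
  · rw [if_neg (show ¬((!(PySem.Str.startswith p.2 "SNAP")) = true) by rw [hs]; decide)]
    rw [if_pos hs]
    cases hparse : PySem.Int.ofStr? (PySem.Str.slice p.2 (some 4) none) with
    | none => rfl
    | some ob =>
      show (if 0 ≤ p.1 + 1 ∧ p.1 + 1 < PySem.List.len cs ∧ pvNotSnapFin cs (p.1 + 1) = true
            then (if 0 ≤ p.1 - 2 ∧ p.1 - 2 < PySem.List.len cs ∧ pvNotSnapFin cs (p.1 - 2) = true
                  then d.insert (p.1 - 2) (d.getD (p.1 - 2) [] ++ ["SNAP" ++ PySem.Int.toStr ob]) else d).insert (p.1 + 1)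
                  ((if 0 ≤ p.1 - 2 ∧ p.1 - 2 < PySem.List.len cs ∧ pvNotSnapFin cs (p.1 - 2) = true
                    then d.insert (p.1 - 2) (d.getD (p.1 - 2) [] ++ ["SNAP" ++ PySem.Int.toStr ob]) else d).getD (p.1 + 1) []
                    ++ ["SNAP" ++ PySem.Int.toStr ob])
            else (if 0 ≤ p.1 - 2 ∧ p.1 - 2 < PySem.List.len cs ∧ pvNotSnapFin cs (p.1 - 2) = true
                  then d.insert (p.1 - 2) (d.getD (p.1 - 2) [] ++ ["SNAP" ++ PySem.Int.toStr ob]) else d))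
        = (List.flatMap (pvGEnt cs) ((p.1, ob) :: ([] : List (Int × Int)))).foldl pvDApp d
      simp only [List.flatMap_cons, List.flatMap_nil, List.append_nil, pvGEnt]
      by_cases hc1 : p.1 - 2 ≥ 0 ∧ pvNotSnapFin cs (p.1 - 2) = true <;>
        by_cases hc2 : p.1 + 1 < PySem.List.len cs ∧ pvNotSnapFin cs (p.1 + 1) = true
      · rw [if_pos hc1, if_pos hc2,
            if_pos (show 0 ≤ p.1 - 2 ∧ p.1 - 2 < PySem.List.len cs ∧ pvNotSnapFin cs (p.1 - 2) = true
              from ⟨hc1.1, by rw [hlen]; omega, hc1.2⟩),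
            if_pos (show 0 ≤ p.1 + 1 ∧ p.1 + 1 < PySem.List.len cs ∧ pvNotSnapFin cs (p.1 + 1) = true
              from ⟨by omega, hc2.1, hc2.2⟩)]
        simp [pvDApp]
      · rw [if_pos hc1, if_neg hc2,
            if_pos (show 0 ≤ p.1 - 2 ∧ p.1 - 2 < PySem.List.len cs ∧ pvNotSnapFin cs (p.1 - 2) = true
              from ⟨hc1.1, by rw [hlen]; omega, hc1.2⟩),
            if_neg (show ¬(0 ≤ p.1 + 1 ∧ p.1 + 1 < PySem.List.len cs ∧ pvNotSnapFin cs (p.1 + 1) = true)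
              from fun h => hc2 ⟨h.2.1, h.2.2⟩)]
        simp [pvDApp]
      · rw [if_neg hc1, if_pos hc2,
            if_neg (show ¬(0 ≤ p.1 - 2 ∧ p.1 - 2 < PySem.List.len cs ∧ pvNotSnapFin cs (p.1 - 2) = true)
              from fun h => hc1 ⟨h.1, h.2.2⟩),
            if_pos (show 0 ≤ p.1 + 1 ∧ p.1 + 1 < PySem.List.len cs ∧ pvNotSnapFin cs (p.1 + 1) = true
              from ⟨by omega, hc2.1, hc2.2⟩)]
        simp [pvDApp]
      · rw [if_neg hc1, if_neg hc2,
            if_neg (show ¬(0 ≤ p.1 - 2 ∧ p.1 - 2 < PySem.List.len cs ∧ pvNotSnapFin cs (p.1 - 2) = true)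
              from fun h => hc1 ⟨h.1, h.2.2⟩),
            if_neg (show ¬(0 ≤ p.1 + 1 ∧ p.1 + 1 < PySem.List.len cs ∧ pvNotSnapFin cs (p.1 + 1) = true)
              from fun h => hc2 ⟨h.2.1, h.2.2⟩)]
        simp
  · rw [if_pos (show (!(PySem.Str.startswith p.2 "SNAP")) = true by
        rw [Bool.not_eq_true] at hs; rw [hs]; decide)]
    rw [if_neg hs]
    rfl

theorem pvBRebuild (cs : List String) (s : Int) (acc : List String)
    (ps : List (Int × String)) (F : Int → List String)
    (hF : ∀ v, F v = (ps.filter (fun q => q.1 = v)).map (fun q => q.2)) :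
    (PySem.List.enumerate cs s).foldl (fun result p => result ++ p.2 :: (F p.1).reverse) acc
      = acc ++ pvInterleave cs s ps := by
  induction cs generalizing s acc with
  | nil => simp [PySem.List.enumerate_nil, pvInterleave]
  | cons c t ih =>
    rw [PySem.List.enumerate_cons]
    simp only [List.foldl_cons]
    rw [ih (s + 1) _]
    simp [pvInterleave, hF s]

-- ===== VERDICT (by name: the statement is the Claim_ definition above) =====
theorem insert_opportunistic_snaps_py_spec : Claim_equal_insert_opportunistic_snaps_py := by
  intro commands obstacles_data _hdom
  unfold Spec_insert_opportunistic_snaps_py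
  by_cases hobs : obstacles_data = []
  · unfold insert_opportunistic_snaps_py insert_opportunistic_snaps_py_alt
    rw [if_pos hobs, if_pos hobs]
  · -- zeta-expanded forms of the two ports (definitional)
    have hAdef : insert_opportunistic_snaps_py commands obstacles_data =
        (if ((PySem.List.enumerate commands).foldl pvSnapInfoStep []).foldl (pvInsertListStep commands) [] = []
         then commands
         else (PySem.List.sorted (((PySem.List.enumerate commands).foldl pvSnapInfoStep []).foldl (pvInsertListStep commands) []) (fun t => t.1) true).foldl
                (fun result t => PySem.List.insert result (t.1 + 1) t.2) commands) := by
      unfold insert_opportunistic_snaps_py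
      rw [if_neg hobs]
    have hBdef : insert_opportunistic_snaps_py_alt commands obstacles_data =
        (PySem.List.enumerate commands).foldl
          (fun result p => result ++ p.2 ::
            (((PySem.List.enumerate commands).foldl (pvBucketStep commands) PySem.Dict.empty).getD p.1 []).reverse) [] := by
      unfold insert_opportunistic_snaps_py_alt
      rw [if_neg hobs]
    rw [hAdef, hBdef]
    -- the common entry list
    set L := (PySem.List.enumerate commands).flatMap (pvEntriesOf commands) with hLdef
    have hbL : ∀ p ∈ L, 0 ≤ p.1 ∧ p.1 < (commands.length : Int) := by
      intro p hp
      obtain ⟨q, hq, hpe⟩ := List.mem_flatMap.1 hp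
      have hbq := pvMem_enumerate commands 0 q hq
      exact pvEntriesOf_bounds commands q p hpe (by omega) (by omega)
    -- A's insert_list is L
    have hIL : ((PySem.List.enumerate commands).foldl pvSnapInfoStep []).foldl (pvInsertListStep commands) [] = L := by
      rw [pvSnapInfo_flatMap, pvInsertList_flatMap]
      simp only [List.nil_append, List.flatMap_assoc]
      rfl
    rw [hIL]
    -- B's dict is the bucket fold over L
    have hBd : (PySem.List.enumerate commands).foldl (pvBucketStep commands) PySem.Dict.empty
        = L.foldl pvDApp PySem.Dict.empty := by
      rw [hLdef, List.foldl_flatMap]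
      refine (PySem.List.foldl_congr_mem _ _ _ _ ?_).symm.trans rfl
      intro d p hp
      have hb := pvMem_enumerate commands 0 p hp
      exact (pvBucketStep_eq commands p d (by omega) (by omega)).symm
    rw [hBd]
    -- B's rebuild is the interleaving with L's buckets
    have hB : (PySem.List.enumerate commands).foldl
        (fun result p => result ++ p.2 :: ((L.foldl pvDApp PySem.Dict.empty).getD p.1 []).reverse) []
        = pvInterleave commands 0 L := by
      have := pvBRebuild commands 0 [] L
        (fun v => (L.foldl pvDApp PySem.Dict.empty).getD v [])
        (fun v => by
          show (L.foldl pvDApp PySem.Dict.empty).getD v []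
              = (L.filter (fun q => q.1 = v)).map (fun q => q.2)
          rw [pvGetD_foldl_dApp]; simp)
      simpa using this
    rw [hB]
    -- A's side
    by_cases hL0 : L = []
    · rw [if_pos hL0, hL0, pvInterleave_nil]
    · rw [if_neg hL0]
      have hbS : ∀ p ∈ PySem.List.sorted L (fun t => t.1) true, 0 ≤ p.1 ∧ p.1 < (commands.length : Int) :=
        fun p hp => hbL p ((PySem.List.sorted_perm L (fun t => t.1) true).mem_iff.1 hp)
      rw [pvFoldl_insert_interleave _ _ (PySem.List.sorted_pairwise_rev L (fun t => t.1)) hbS]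
      exact pvInterleave_congr commands 0 _ _ (fun v => pvFilter_sorted L v)
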